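-- pv_equiv track=rewrite | github.com/JonghyunLEE12/SWEA | 0221/swea6190/sol6190.py | rlt
-- ===== SOURCE A (Python) =====
-- def check(num):
--     num = str(num)
--     for i in range(len(num)-1):
--         if num[i] > num[i+1]:
--             return False
--     return True
--
-- def rlt(arr):
--     max_num = -1                        # 단조 증가 하는 수가 없으면 -1
--     for i in range(len(arr)-1):
--         for j in range(i+1,len(arr)):
--             num = arr[i]*arr[j]
--             if num > max_num and check(num):
--                 max_num = num
--     return max_num
-- ===== SOURCE B (Python) =====
-- def _mono(p):
--     p = abs(p)
--     while p >= 10: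
--         if p % 10 < p // 10 % 10:
--             return False
--         p //= 10
--     return True
--
-- def rlt(arr):
--     prods = sorted((x * y for k, x in enumerate(arr) for y in arr[k + 1:]),
--                    reverse=True)
--     for p in prods:
--         if p < 0:
--             return -1
--         if _mono(p):
--             return p
--     return -1
-- ===== Notes on version B (the rewrite author's own statement) =====
-- stated objective: alternative
-- what changed: B replaces the nested running-max accumulation over all pairs by a staged best-first search: it materialises all pair products, sorts them descending, and returns the first one whose digits are non-decreasing (early exit, -1 once only negative candidates remain); the digit test itself is purely arithmetic on abs(p) via %10 and //10 instead of scanning the characters of str(p).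
import Mathlib
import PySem

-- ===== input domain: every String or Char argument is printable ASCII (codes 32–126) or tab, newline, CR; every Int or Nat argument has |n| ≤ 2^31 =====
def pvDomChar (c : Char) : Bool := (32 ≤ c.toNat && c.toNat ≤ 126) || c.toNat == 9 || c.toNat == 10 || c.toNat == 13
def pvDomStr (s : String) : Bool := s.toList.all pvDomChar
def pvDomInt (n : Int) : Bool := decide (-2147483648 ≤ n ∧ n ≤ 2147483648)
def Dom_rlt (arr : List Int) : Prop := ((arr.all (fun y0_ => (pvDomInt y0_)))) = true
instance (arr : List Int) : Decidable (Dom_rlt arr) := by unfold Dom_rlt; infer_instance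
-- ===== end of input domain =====

-- B replaces the nested running-max accumulation by sort-all-products-descending then
-- return the first digit-monotone one (early exit), with a purely arithmetic digit test
-- on abs(p) instead of scanning the characters of str(p) (alternative algorithm).

-- ===== PORT A =====
-- check's loop: for i in range(len(num)-1): if num[i] > num[i+1]: return False — adjacent-pair scan
def checkScan : List Char → Bool
  | a :: b :: rest => if a > b then false else checkScan (b :: rest)
  | _ => true

def check (num : Int) : Bool := checkScan (PySem.Int.toStr num).toList

def rlt (arr : List Int) : Int :=
  (PySem.List.pyRange 0 ((arr.length : Int) - 1) 1).foldl (fun max_num i =>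
    (PySem.List.pyRange (i + 1) (arr.length : Int) 1).foldl (fun max_num j =>
      let num := PySem.List.pyGetD arr i 0 * PySem.List.pyGetD arr j 0
      if num > max_num ∧ check num then num else max_num) max_num) (-1)

-- ===== PORT B =====
-- _mono's while loop: while p >= 10: if p % 10 < p // 10 % 10: return False; p //= 10
def monoLoop (p : Int) : Bool :=
  if h : 10 ≤ p then
    if PySem.Int.mod p 10 < PySem.Int.mod (PySem.Int.floordiv p 10) 10 then false
    else monoLoop (PySem.Int.floordiv p 10)
  else true
termination_by p.toNat
decreasing_by
  rw [PySem.Int.floordiv_eq_ediv_of_pos (by norm_num : (0:Int) < 10)]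
  omega

def mono (p : Int) : Bool := monoLoop |p|

-- the for loop over the descending products: return p / return -1 / fall through
def scanDesc : List Int → Int
  | [] => -1
  | p :: rest => if p < 0 then -1 else if mono p then p else scanDesc rest

def rlt_alt (arr : List Int) : Int :=
  scanDesc (PySem.List.sorted
    ((PySem.List.enumerate arr).flatMap (fun kx =>
      (PySem.List.slice arr (some (kx.1 + 1)) none).map (fun y => kx.2 * y)))
    (fun y => y) true)

-- ===== PRECONDITION & SPEC =====
def Spec_rlt (arr : List Int) (out : Int) : Prop := out = rlt_alt arr
instance (arr : List Int) (out : Int) : Decidable (Spec_rlt arr out) := by unfold Spec_rlt; infer_instance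

-- ===== CLAIM (what is proved, stated in full; the proofs are below) =====
def Claim_equal_rlt : Prop := ∀ (arr : List Int), Dom_rlt arr → Spec_rlt arr (rlt arr)

-- ===== LEMMAS AND PROOFS =====

-- Nat mirror of monoLoop
def monoNat (n : Nat) : Bool :=
  if h : 10 ≤ n then
    if n % 10 < n / 10 % 10 then false else monoNat (n / 10)
  else true
termination_by n
decreasing_by omega

theorem monoLoop_natCast (m : Nat) : monoLoop (m : Int) = monoNat m := by
  induction m using Nat.strong_induction_on with
  | _ m ih =>
    rw [monoLoop, monoNat]
    have hdiv : PySem.Int.floordiv (m : Int) 10 = ((m / 10 : Nat) : Int) := by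
      exact_mod_cast PySem.Int.floordiv_natCast m 10
    have hmodm : PySem.Int.mod (m : Int) 10 = ((m % 10 : Nat) : Int) := by
      exact_mod_cast PySem.Int.mod_natCast m 10
    have hmodd : PySem.Int.mod (((m / 10 : Nat) : Int)) 10 = ((m / 10 % 10 : Nat) : Int) := by
      exact_mod_cast PySem.Int.mod_natCast (m / 10) 10
    rw [hdiv, hmodm, hmodd]
    by_cases h : 10 ≤ m
    · rw [dif_pos (by exact_mod_cast h), dif_pos h]
      by_cases hlt : m % 10 < m / 10 % 10
      · rw [if_pos (by exact_mod_cast hlt), if_pos hlt]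
      · rw [if_neg (by exact_mod_cast hlt), if_neg hlt]
        exact ih (m / 10) (by omega)
    · rw [dif_neg (by exact_mod_cast h), dif_neg h]

-- ---- digit/char machinery ----

theorem digitChar_le_digitChar {a b : Nat} (ha : a < 10) (hb : b < 10) :
    (Nat.digitChar a ≤ Nat.digitChar b) ↔ a ≤ b := by
  interval_cases a <;> interval_cases b <;> decide

theorem not_digitChar_lt_dash {a : Nat} (ha : a < 10) : ¬ Nat.digitChar a < '-' := by
  interval_cases a <;> decide

theorem checkScan_iff : ∀ l : List Char, checkScan l = true ↔ l.IsChain (· ≤ ·)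
  | [] => by simp [checkScan]
  | [a] => by simp [checkScan]
  | a :: b :: rest => by
    rw [checkScan, List.isChain_cons_cons]
    by_cases h : a > b
    · simp only [if_pos h, Bool.false_eq_true, false_iff]
      exact fun ⟨hab, _⟩ => absurd hab (not_le.mpr h)
    · simp [if_neg h, checkScan_iff (b :: rest), le_of_not_gt h]

theorem toDigitsCore_eq (f : Nat) : ∀ (n : Nat) (acc : List Char), n < f → 0 < n →
    Nat.toDigitsCore 10 f n acc = ((Nat.digits 10 n).map Nat.digitChar).reverse ++ acc := by
  induction f with
  | zero => intro n acc h _; omega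
  | succ f ih =>
    intro n acc h hn
    rw [Nat.toDigitsCore, Nat.digits_def' (by norm_num : 1 < 10) hn]
    simp only [List.map_cons, List.reverse_cons]
    by_cases h0 : n / 10 = 0
    · rw [if_pos h0, h0, Nat.digits_zero]
      simp
    · rw [if_neg h0, ih (n / 10) _ (by omega) (by omega)]
      simp

theorem toDigits_eq (n : Nat) (hn : 0 < n) :
    Nat.toDigits 10 n = ((Nat.digits 10 n).map Nat.digitChar).reverse := by
  rw [Nat.toDigits, toDigitsCore_eq (n + 1) n [] (by omega) hn, List.append_nil]

theorem chainDigits (n : Nat) :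
    checkScan (((Nat.digits 10 n).map Nat.digitChar).reverse) = monoNat n := by
  induction n using Nat.strong_induction_on with
  | _ n ih =>
    rw [monoNat]
    by_cases hn : 10 ≤ n
    · rw [dif_pos hn]
      have h1 : Nat.digits 10 n = n % 10 :: Nat.digits 10 (n / 10) :=
        Nat.digits_def' (by norm_num) (by omega)
      have h2 : Nat.digits 10 (n / 10) = n / 10 % 10 :: Nat.digits 10 (n / 10 / 10) :=
        Nat.digits_def' (by norm_num) (by omega)
      rw [h1, List.map_cons, List.reverse_cons]
      have hlast : ((Nat.digits 10 (n / 10)).map Nat.digitChar).reverse.getLast?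
          = some (Nat.digitChar (n / 10 % 10)) := by
        rw [h2]; simp
      by_cases hlt : n % 10 < n / 10 % 10
      · rw [if_pos hlt, Bool.eq_iff_iff, checkScan_iff, List.isChain_append]
        simp only [Bool.false_eq_true, iff_false]
        rintro ⟨-, -, hR⟩
        have hle := hR _ (by rw [hlast]; rfl) _ rfl
        rw [digitChar_le_digitChar (Nat.mod_lt _ (by norm_num)) (Nat.mod_lt _ (by norm_num))] at hle
        omega
      · rw [if_neg hlt, ← ih (n / 10) (by omega), Bool.eq_iff_iff,
          checkScan_iff, checkScan_iff, List.isChain_append]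
        constructor
        · exact fun h => h.1
        · intro h
          refine ⟨h, by simp, ?_⟩
          intro x hx y hy
          rw [hlast, Option.mem_def, Option.some_inj] at hx
          simp only [List.head?_cons, Option.mem_def, Option.some_inj] at hy
          subst hx; subst hy
          rw [digitChar_le_digitChar (Nat.mod_lt _ (by norm_num)) (Nat.mod_lt _ (by norm_num))]
          omega
    · rw [dif_neg hn]
      rcases Nat.eq_zero_or_pos n with h0 | h0
      · subst h0; simp [checkScan]
      · rw [Nat.digits_def' (by norm_num : 1 < 10) h0,
          Nat.div_eq_of_lt (by omega), Nat.digits_zero]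
        simp [checkScan]

theorem checkScan_dash_cons (l : List Char) (h : ∀ c ∈ l, ¬ c < '-') :
    checkScan ('-' :: l) = checkScan l := by
  cases l with
  | nil => rfl
  | cons c r => rw [checkScan, if_neg (h c List.mem_cons_self)]

theorem check_eq_mono (p : Int) : check p = mono p := by
  have habs : |p| = (p.natAbs : Int) := Int.abs_eq_natAbs p
  rw [check, mono, habs, monoLoop_natCast, PySem.Int.toList_toStr, PySem.Int.toChars]
  by_cases hneg : p < 0
  · rw [if_pos hneg]
    have hm : 0 < p.natAbs := by omega
    rw [toDigits_eq _ hm, checkScan_dash_cons, chainDigits]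
    intro c hc
    rw [List.mem_reverse, List.mem_map] at hc
    obtain ⟨d, hd, rfl⟩ := hc
    exact not_digitChar_lt_dash (Nat.digits_lt_base (by norm_num) hd)
  · rw [if_neg hneg]
    have ht : p.toNat = p.natAbs := by omega
    rw [ht]
    rcases Nat.eq_zero_or_pos p.natAbs with h0 | h0
    · rw [h0]
      have h1 : Nat.toDigits 10 0 = ['0'] := rfl
      rw [h1, monoNat]
      simp [checkScan]
    · rw [toDigits_eq _ h0, chainDigits]

-- ---- outer loop machinery ----

theorem filterMap_if_map (f : Int → Int) (q : Int → Bool) (l : List Int) :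
    l.filterMap (fun j => if q (f j) then some (f j) else none) = (l.map f).filter q := by
  induction l with
  | nil => rfl
  | cons x t ih => by_cases h : q (f x) <;> simp [List.filterMap_cons, h, ih]

theorem filter_flatMap (q : Int → Bool) (F : Int → List Int) (l : List Int) :
    (l.flatMap F).filter q = l.flatMap (fun x => (F x).filter q) := by
  induction l with
  | nil => rfl
  | cons x t ih => simp [List.flatMap_cons, List.filter_append, ih]

theorem foldl_max_of_le (l : List Int) (m : Int) (h : ∀ x ∈ l, x ≤ m) :
    l.foldl max m = m := by
  induction l generalizing m with
  | nil => rfl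
  | cons x t ih =>
    have hx : x ≤ m := h x List.mem_cons_self
    simp only [List.foldl_cons, max_eq_left hx]
    exact ih m (fun y hy => h y (List.mem_cons_of_mem _ hy))

theorem foldl_max_perm {l₁ l₂ : List Int} (h : l₁.Perm l₂) (m : Int) :
    l₁.foldl max m = l₂.foldl max m := by
  induction h generalizing m with
  | nil => rfl
  | cons x _ ih => simp only [List.foldl_cons]; exact ih _
  | swap x y l =>
    simp only [List.foldl_cons]
    rw [max_right_comm]
  | trans _ _ ih₁ ih₂ => exact (ih₁ m).trans (ih₂ m)

-- the running-max loop over products f j equals max folded over the qualifying products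
theorem inner_lemma (f : Int → Int) (js : List Int) (m : Int) :
    js.foldl (fun m j => if f j > m ∧ check (f j) then f j else m) m
      = (js.filterMap (fun j => if mono (f j) then some (f j) else none)).foldl max m := by
  induction js generalizing m with
  | nil => rfl
  | cons j t ih =>
    simp only [check_eq_mono] at ih ⊢
    simp only [List.foldl_cons, List.filterMap_cons]
    by_cases hc : mono (f j)
    · have h : (if f j > m then f j else m) = max m (f j) := by
        split_ifs with h' <;> omega
      simp only [hc, and_true, if_true, h, List.foldl_cons]
      exact ih (max m (f j))
    · simp only [hc, Bool.false_eq_true, and_false, if_false]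
      exact ih m

theorem foldl_max_flatMap (F : Int → List Int) (is : List Int) (m : Int) :
    is.foldl (fun m i => (F i).foldl max m) m = (is.flatMap F).foldl max m := by
  induction is generalizing m with
  | nil => rfl
  | cons i t ih => simp only [List.foldl_cons, List.flatMap_cons, List.foldl_append, ih]

theorem flatMap_range_pred (G : Int → List Int) (n : Int) (hGn : G (n - 1) = []) :
    (PySem.List.pyRange 0 (n - 1) 1).flatMap G = (PySem.List.pyRange 0 n 1).flatMap G := by
  by_cases h1 : 1 ≤ n
  · have hsplit : PySem.List.pyRange 0 n 1
        = PySem.List.pyRange 0 (n - 1) 1 ++ [n - 1] := by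
      have h := PySem.List.pyRange_one_succ_right (a := 0) (b := n - 1) (by omega)
      rw [show n - 1 + 1 = n by ring] at h
      exact h
    rw [hsplit, List.flatMap_append, List.flatMap_cons, List.flatMap_nil, hGn,
      List.append_nil, List.append_nil]
  · rw [PySem.List.pyRange_one_eq_nil (by omega : n ≤ 0),
      PySem.List.pyRange_one_eq_nil (by omega : n - 1 ≤ 0)]

theorem flatMap_congr_mem {α β : Type} (l : List α) {f g : α → List β}
    (h : ∀ x ∈ l, f x = g x) : l.flatMap f = l.flatMap g := by
  induction l with
  | nil => rfl
  | cons x t ih =>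
    simp only [List.flatMap_cons, h x List.mem_cons_self,
      ih (fun y hy => h y (List.mem_cons_of_mem _ hy))]

theorem map_pyGetD_drop (arr : List Int) (k : Nat) :
    (PySem.List.pyRange (k : Int) (arr.length : Int) 1).map
      (fun j => PySem.List.pyGetD arr j 0) = arr.drop k := by
  rw [PySem.List.pyRange_one, List.map_map]
  have hlen : (((arr.length : Int) - k).toNat) = arr.length - k := by omega
  rw [hlen]
  apply List.ext_getElem
  · simp
  · intro i h1 h2
    simp only [List.getElem_map, List.getElem_range, Function.comp_apply]
    have hcast : ((k : Int) + (i : Nat)) = ((k + i : Nat) : Int) := by push_cast; ring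
    rw [hcast, PySem.List.pyGetD_natCast, List.getElem_drop]
    have hki : k + i < arr.length := by
      simp only [List.length_map, List.length_range] at h1
      omega
    rw [List.getD_eq_getElem _ _ hki]

-- the descending scan computes the seeded max of the qualifying elements
theorem scanDesc_eq (q : List Int) (hq : q.Pairwise (fun a b => b ≤ a)) :
    scanDesc q = (q.filter (fun p => mono p)).foldl max (-1) := by
  induction q with
  | nil => rfl
  | cons p t ih =>
    rw [List.pairwise_cons] at hq
    obtain ⟨hpt, ht⟩ := hq
    rw [scanDesc]
    by_cases hneg : p < 0
    · rw [if_pos hneg]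
      have hall : ∀ x ∈ (p :: t).filter (fun p => mono p), x ≤ -1 := by
        intro x hx
        have hx' := List.mem_of_mem_filter hx
        rcases List.mem_cons.1 hx' with h | h
        · omega
        · have := hpt x h; omega
      exact (foldl_max_of_le _ _ hall).symm
    · rw [if_neg hneg]
      by_cases hm : mono p
      · rw [if_pos hm, List.filter_cons, if_pos hm, List.foldl_cons,
          max_eq_right (by omega : (-1:Int) ≤ p)]
        exact (foldl_max_of_le _ _ (fun x hx => hpt x (List.mem_of_mem_filter hx))).symm
      · rw [if_neg hm, List.filter_cons, if_neg hm]
        exact ih ht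

theorem rlt_spec : Claim_equal_rlt := by
  intro arr _
  unfold Spec_rlt rlt rlt_alt
  set n : Int := (arr.length : Int) with hn
  set g : Int → Int := fun i => PySem.List.pyGetD arr i 0 with hg
  set G : Int → List Int := fun i =>
    (PySem.List.pyRange (i + 1) n 1).filterMap (fun j =>
      if mono (g i * g j) then some (g i * g j) else none) with hG
  set P : List Int := (PySem.List.pyRange 0 n 1).flatMap
    (fun i => (PySem.List.pyRange (i + 1) n 1).map (fun j => g i * g j)) with hP
  -- A side: the nested running-max loops compute foldl max (-1) over the qualifying products
  have hA : (PySem.List.pyRange 0 (n - 1) 1).foldl (fun max_num i =>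
      (PySem.List.pyRange (i + 1) n 1).foldl (fun max_num j =>
        let num := g i * g j
        if num > max_num ∧ check num then num else max_num) max_num) (-1)
      = (P.filter (fun p => mono p)).foldl max (-1) := by
    have hGn : G (n - 1) = [] := by
      rw [hG]
      show ((PySem.List.pyRange (n - 1 + 1) n 1).filterMap _) = []
      rw [show n - 1 + 1 = n by ring, PySem.List.pyRange_one_eq_nil le_rfl]
      rfl
    calc (PySem.List.pyRange 0 (n - 1) 1).foldl (fun max_num i =>
            (PySem.List.pyRange (i + 1) n 1).foldl (fun max_num j =>
              let num := g i * g j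
              if num > max_num ∧ check num then num else max_num) max_num) (-1)
        = (PySem.List.pyRange 0 (n - 1) 1).foldl (fun m i => (G i).foldl max m) (-1) :=
          List.foldl_ext _ _ _ (fun m i _ =>
            inner_lemma (fun j => g i * g j) (PySem.List.pyRange (i + 1) n 1) m)
      _ = ((PySem.List.pyRange 0 (n - 1) 1).flatMap G).foldl max (-1) :=
          foldl_max_flatMap G _ _
      _ = ((PySem.List.pyRange 0 n 1).flatMap G).foldl max (-1) := by
          rw [flatMap_range_pred G n hGn]
      _ = (P.filter (fun p => mono p)).foldl max (-1) := by
          rw [hP, filter_flatMap]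
          congr 1
          refine flatMap_congr_mem _ (fun i _ => ?_)
          exact filterMap_if_map (fun j => g i * g j) (fun p => mono p)
            (PySem.List.pyRange (i + 1) n 1)
  rw [hA]
  -- the enumerate/slice product list equals P
  have hPB : (PySem.List.enumerate arr).flatMap (fun kx =>
      (PySem.List.slice arr (some (kx.1 + 1)) none).map (fun y => kx.2 * y)) = P := by
    rw [PySem.List.enumerate_eq_map_pyRange arr 0, List.flatMap_map, hP]
    refine flatMap_congr_mem _ (fun i hi => ?_)
    have hi' := (PySem.List.mem_pyRange_one).1 hi
    have h1 : i + 1 = (((i + 1).toNat : Nat) : Int) := by omega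
    rw [PySem.List.slice_from arr (by omega : (0:Int) ≤ i + 1)]
    have h2 := map_pyGetD_drop arr (i + 1).toNat
    rw [← h1] at h2
    have hnn : PySem.List.pyRange (i + 1) (arr.length : Int) 1 = PySem.List.pyRange (i + 1) n 1 := by
      rw [hn]
    rw [hnn] at h2
    rw [← h2, List.map_map]
    rfl
  rw [hPB]
  -- B side: the descending scan over the sorted products
  have hpw : (PySem.List.sorted P (fun y => y) true).Pairwise (fun a b => b ≤ a) :=
    PySem.List.sorted_pairwise_rev P (fun y => y)
  rw [scanDesc_eq _ hpw]
  exact (foldl_max_perm (((PySem.List.sorted_perm P (fun y => y) true)).filter _) (-1)).symm
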